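-- pv_equiv track=rewrite | github.com/melsner/scil2019-fusion | script/fstFusion.py | linearPartitions
-- ===== SOURCE A (Python) =====
-- def linearPartitions(items):
--     if len(items) == 0:
--         return [[ ]]
--     else:
--         res = []
--         for groupLength in range(1, len(items) + 1):
--             currGroup = items[:groupLength]
--             rest = items[groupLength:]
--             moreParts = linearPartitions(rest)
--
--             for more in moreParts:
--                 res.append([currGroup,] + more)
--
--         return res
-- ===== SOURCE B (Python) =====
-- def linearPartitions(items):
--     # Bottom-up DP over suffixes: table[k] holds the compositions of suffix[k:],
--     # built once per suffix and reused, instead of recomputing them recursively.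
--     suffix = []
--     table = [[[]]]  # compositions of the empty suffix
--     for x in reversed(items):
--         suffix = [x] + suffix
--         entry = [[suffix[:k + 1]] + p for k, parts in enumerate(table) for p in parts]
--         table = [entry] + table
--     return table[0]
-- ===== Notes on version B (the rewrite author's own statement) =====
-- stated objective: alternative
-- what changed: Replaces A's top-down recursion (which re-derives the compositions of each suffix in every call context) by an iterative bottom-up dynamic program that builds a table of composition lists, one per suffix, each computed exactly once and reused.
import Mathlib
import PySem

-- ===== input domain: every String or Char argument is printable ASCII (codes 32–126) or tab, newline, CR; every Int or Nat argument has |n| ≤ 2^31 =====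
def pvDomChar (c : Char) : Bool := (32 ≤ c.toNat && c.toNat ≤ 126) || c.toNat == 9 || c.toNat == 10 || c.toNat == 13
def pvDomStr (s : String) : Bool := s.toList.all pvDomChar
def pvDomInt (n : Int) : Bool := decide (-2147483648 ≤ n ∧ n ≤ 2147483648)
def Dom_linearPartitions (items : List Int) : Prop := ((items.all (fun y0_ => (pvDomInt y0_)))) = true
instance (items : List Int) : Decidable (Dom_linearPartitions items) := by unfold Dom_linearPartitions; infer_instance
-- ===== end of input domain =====

-- B replaces A's naive recursion by a bottom-up DP table over suffixes (each suffix's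
-- composition list is built once and reused); alternative algorithm, same output.


-- ===== PORT A =====
def linearPartitions (items : List Int) : List (List (List Int)) :=
  if items.length = 0 then [[]]
  else
    (PySem.List.pyRange 1 ((items.length : Int) + 1) 1).attach.foldl
      (fun res g =>
        let currGroup := PySem.List.slice items none (some g.1)
        let rest := PySem.List.slice items (some g.1) none
        let moreParts := linearPartitions rest
        moreParts.foldl (fun r more => r ++ [currGroup :: more]) res)
      []
termination_by items.length
decreasing_by
  have hg := PySem.List.mem_pyRange_one.mp g.2
  have h1 : PySem.List.slice items (some g.1) none = items.drop g.1.toNat :=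
    PySem.List.slice_from items (by omega)
  rw [h1]
  simp only [List.length_drop]
  omega

-- ===== PORT B =====
def lpStep (x : Int) (acc : List Int × List (List (List (List Int)))) :
    List Int × List (List (List (List Int))) :=
  let s := x :: acc.1
  let entry := (PySem.List.enumerate acc.2 0).flatMap
    (fun kp => kp.2.map (fun p => PySem.List.slice s none (some (kp.1 + 1)) :: p))
  (s, entry :: acc.2)

def linearPartitions_alt (items : List Int) : List (List (List Int)) :=
  (items.foldr lpStep ([], [[[]]])).2.headD []

-- ===== PRECONDITION & SPEC =====
def Spec_linearPartitions (items : List Int) (out : List (List (List Int))) : Prop := out = linearPartitions_alt items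
instance (items : List Int) (out : List (List (List Int))) : Decidable (Spec_linearPartitions items out) := by unfold Spec_linearPartitions; infer_instance

-- ===== CLAIM =====
def Claim_equal_linearPartitions : Prop := ∀ (items : List Int), Dom_linearPartitions items → Spec_linearPartitions items (linearPartitions items)

-- ===== LEMMAS AND PROOFS =====

lemma flatMap_attach' {α β : Type} (l : List α) (F : α → List β) :
    l.attach.flatMap (fun g => F g.1) = l.flatMap F := by
  conv_rhs => rw [← List.attach_map_subtype_val l]
  rw [List.flatMap_map]

lemma enumerate_map {α β : Type} (F : α → β) :
    ∀ (u : List α) (s : Int),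
      PySem.List.enumerate (u.map F) s = (PySem.List.enumerate u s).map (fun kp => (kp.1, F kp.2)) := by
  intro u
  induction u with
  | nil => intro s; simp [PySem.List.enumerate_nil]
  | cons x t ih => intro s; simp [PySem.List.enumerate_cons, ih]

lemma enumerate_tails_flatMap {α γ : Type} :
    ∀ (t : List α) (s : Int) (G : Int × List α → List γ),
      (PySem.List.enumerate t.tails s).flatMap G
        = (List.range (t.length + 1)).flatMap (fun (k : Nat) => G (s + (k : Int), t.drop k)) := by
  intro t
  induction t with
  | nil =>
      intro s G
      simp [PySem.List.enumerate_cons, PySem.List.enumerate_nil]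
  | cons x t ih =>
      intro s G
      rw [List.tails_cons, PySem.List.enumerate_cons, List.flatMap_cons, ih (s + 1) G]
      conv_rhs => rw [List.range_succ_eq_map, List.flatMap_cons, List.flatMap_map]
      congr 1
      · norm_num
      · apply List.flatMap_congr
        intro k _
        have h1 : s + 1 + (k : Int) = s + ((k.succ : Nat) : Int) := by push_cast; ring
        rw [h1]
        rfl

-- A's body, rewritten as a flatMap over the block lengths.
lemma linearPartitions_cons (x : Int) (t : List Int) :
    linearPartitions (x :: t)
      = (List.range (t.length + 1)).flatMap
          (fun k => (linearPartitions ((x :: t).drop (k + 1))).map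
            (fun m => (x :: t).take (k + 1) :: m)) := by
  rw [linearPartitions]
  simp only [List.length_cons, if_neg (by omega : ¬ t.length + 1 = 0)]
  have hfold : ∀ {P : Int → Prop} (l : List {g : Int // P g}) (init : List (List (List Int))),
      l.foldl (fun res g =>
        (linearPartitions (PySem.List.slice (x :: t) (some g.1) none)).foldl
          (fun r more => r ++ [PySem.List.slice (x :: t) none (some g.1) :: more]) res) init
      = init ++ l.flatMap (fun g =>
          (linearPartitions (PySem.List.slice (x :: t) (some g.1) none)).map
            (fun more => PySem.List.slice (x :: t) none (some g.1) :: more)) := by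
    intro P l
    induction l with
    | nil => intro init; simp
    | cons a l ih =>
        intro init
        rw [List.foldl_cons, ih, PySem.List.foldl_append_singleton_eq_map]
        simp
  rw [hfold, List.nil_append]
  rw [flatMap_attach' _ (fun v =>
          (linearPartitions (PySem.List.slice (x :: t) (some v) none)).map
            (fun more => PySem.List.slice (x :: t) none (some v) :: more))]
  have hr : PySem.List.pyRange 1 (((t.length + 1 : Nat) : Int) + 1) 1
      = (List.range (t.length + 1)).map (fun (k : Nat) => (1 : Int) + (k : Int)) := by
    rw [PySem.List.pyRange_one]
    have e : ((((t.length + 1 : Nat) : Int) + 1) - 1).toNat = t.length + 1 := by omega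
    rw [e]
  rw [hr, List.flatMap_map]
  apply List.flatMap_congr
  intro k _
  have h1 : ((1 : Int) + k) = (((k + 1 : Nat) : Int)) := by push_cast; ring
  rw [h1, PySem.List.slice_from_natCast, PySem.List.slice_to_natCast]

lemma alt_nil : linearPartitions_alt [] = [[]] := rfl

lemma foldr_lpStep_inv :
    ∀ (l : List Int), l.foldr lpStep ([], [[[]]]) = (l, l.tails.map linearPartitions_alt) := by
  intro l
  induction l with
  | nil => rfl
  | cons x t ih =>
      have halt : linearPartitions_alt (x :: t)
          = (lpStep x (t, t.tails.map linearPartitions_alt)).2.headD [] := by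
        conv_lhs => rw [linearPartitions_alt]
        rw [List.foldr_cons, ih]
      rw [List.foldr_cons, ih, List.tails_cons, List.map_cons, halt]
      rfl

lemma alt_cons (x : Int) (t : List Int) :
    linearPartitions_alt (x :: t)
      = (PySem.List.enumerate (t.tails.map linearPartitions_alt) 0).flatMap
          (fun kp => kp.2.map (fun p => PySem.List.slice (x :: t) none (some (kp.1 + 1)) :: p)) := by
  unfold linearPartitions_alt
  rw [List.foldr_cons, foldr_lpStep_inv t]
  rfl

lemma lp_eq_alt : ∀ (n : Nat) (items : List Int), items.length ≤ n →
    linearPartitions items = linearPartitions_alt items := by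
  intro n
  induction n with
  | zero =>
      intro items h
      have : items = [] := List.length_eq_zero_iff.mp (by omega)
      subst this
      rw [alt_nil, linearPartitions]
      simp
  | succ n ih =>
      intro items h
      match items with
      | [] =>
          rw [alt_nil, linearPartitions]; simp
      | x :: t =>
          rw [linearPartitions_cons, alt_cons]
          rw [enumerate_map, List.flatMap_map]
          rw [enumerate_tails_flatMap t 0
            (fun kp => (linearPartitions_alt kp.2).map
              (fun p => PySem.List.slice (x :: t) none (some (kp.1 + 1)) :: p))]
          apply List.flatMap_congr
          intro k _
          simp only [List.length_cons] at h
          have hrec : linearPartitions ((x :: t).drop (k + 1)) = linearPartitions_alt ((x :: t).drop (k + 1)) := by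
            apply ih
            simp only [List.length_drop, List.length_cons]
            omega
          have hdrop : (x :: t).drop (k + 1) = t.drop k := by simp
          have htake : ((0 : Int) + k + 1) = (((k + 1 : Nat) : Int)) := by push_cast; ring
          rw [hrec, hdrop, htake, PySem.List.slice_to_natCast]

-- ===== VERDICT =====
theorem linearPartitions_spec : Claim_equal_linearPartitions := by
  intro items _
  unfold Spec_linearPartitions
  exact lp_eq_alt items.length items le_rfl
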